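-- pv_equiv track=rewrite | github.com/Junobee25/Algorithm | 백준/Gold/7677. Fibonacci/Fibonacci.py | f
-- ===== SOURCE A (Python) =====
-- def mult(a,b):
--     arr = [[0,0], [0,0]]
--     for k in range(2):
--         for i in range(2):
--             for j in range(2):
--                 arr[i][j] += a[i][k]*b[k][j] % 10000
--     return arr
--
-- def f(x,n):
--     if n == 1:
--         return x
--     else:
--         matrix = f(x, n//2)
--         if n % 2 == 0:
--             return mult(matrix, matrix)
--         else:
--             return mult(mult(matrix, matrix), x)
-- ===== SOURCE B (Python) =====
-- def mult(a,b):
--     arr = [[0,0], [0,0]]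
--     for k in range(2):
--         for i in range(2):
--             for j in range(2):
--                 arr[i][j] += a[i][k]*b[k][j] % 10000
--     return arr
--
-- def f(x, n):
--     # iterative MSB-first binary exponentiation: same grouping as the
--     # recursion ('square, then multiply by x on an odd bit'), no recursion
--     result = x
--     for c in bin(n)[3:]:
--         result = mult(result, result)
--         if c == '1':
--             result = mult(result, x)
--     return result
-- ===== Notes on version B (the rewrite author's own statement) =====
-- stated objective: alternative
-- what changed: Replaces A's recursive halving with an iterative MSB-first binary-exponentiation loop over the bits of n (leading bit dropped), which reproduces exactly the recursion's square-then-multiply grouping without any recursion.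
import Mathlib
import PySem

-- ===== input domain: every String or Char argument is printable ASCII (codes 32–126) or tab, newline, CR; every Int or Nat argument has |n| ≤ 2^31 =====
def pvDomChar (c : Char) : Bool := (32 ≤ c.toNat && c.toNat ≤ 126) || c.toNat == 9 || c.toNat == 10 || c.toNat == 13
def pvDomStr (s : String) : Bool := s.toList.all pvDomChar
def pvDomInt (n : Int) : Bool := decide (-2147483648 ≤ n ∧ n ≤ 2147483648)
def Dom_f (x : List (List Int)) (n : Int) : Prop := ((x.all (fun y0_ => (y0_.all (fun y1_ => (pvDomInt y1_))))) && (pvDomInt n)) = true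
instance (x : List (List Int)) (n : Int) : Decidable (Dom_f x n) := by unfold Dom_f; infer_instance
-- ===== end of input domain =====

-- B replaces A's recursive halving with an iterative MSB-first binary-exponentiation
-- loop over the bits of n; same O(log n) multiplication count (objective: alternative).


-- ===== PORT A =====
-- shared helper `mult` (both Pythons contain the identical helper):
-- arr[i][j] accumulates (a[i][k]*b[k][j]) % 10000 over k (outer), i, j.
-- Indexing uses getD 0 / []; exact under Pre_f, which guarantees all indices in range
-- (Python raises IndexError otherwise, and those inputs are outside Pre_f).
def mget (m : List (List Int)) (i j : Nat) : Int := (m.getD i []).getD j 0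

def mset (m : List (List Int)) (i j : Nat) (v : Int) : List (List Int) :=
  m.set i ((m.getD i []).set j v)

def multAB (a b : List (List Int)) : List (List Int) :=
  (PySem.List.pyRange 0 2 1).foldl (fun arr k =>
    (PySem.List.pyRange 0 2 1).foldl (fun arr i =>
      (PySem.List.pyRange 0 2 1).foldl (fun arr j =>
        mset arr i.toNat j.toNat
          (mget arr i.toNat j.toNat +
            PySem.Int.mod (mget a i.toNat k.toNat * mget b k.toNat j.toNat) 10000)) arr) arr)
    ([[0,0],[0,0]])

-- A's recursion on n//2; done on Nat so it is structural-by-halving. Python diverges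
-- for n ≤ 0 (outside Pre_f); the `n ≤ 1` guard only makes the recursion total there.
def fARec (x : List (List Int)) (n : Nat) : List (List Int) :=
  if h : n ≤ 1 then x
  else
    let matrix := fARec x (n / 2)
    if n % 2 = 0 then multAB matrix matrix
    else multAB (multAB matrix matrix) x
termination_by n
decreasing_by omega

def f (x : List (List Int)) (n : Int) : List (List Int) := fARec x n.toNat

-- ===== PORT B =====
-- bin(n)[3:]: the bits of n below the most significant one, MSB first (n ≥ 1).
def pvBits (n : Nat) : List Nat :=
  if _h : n ≤ 1 then [] else pvBits (n / 2) ++ [n % 2]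
termination_by n
decreasing_by omega

-- bin(n)[3:] also for n < 0: '-0b...'[3:] is ALL bits of |n|, MSB first.
def pvBin3 (n : Int) : List Nat :=
  if n < 0 then 1 :: pvBits (-n).toNat else pvBits n.toNat

def f_alt (x : List (List Int)) (n : Int) : List (List Int) :=
  (pvBin3 n).foldl
    (fun result c =>
      let result := multAB result result
      if c = 1 then multAB result x else result)
    x

-- ===== PRECONDITION & SPEC =====
-- Pre_f excludes exactly the inputs on which Python A does not return: n < 1
-- (infinite recursion / RecursionError) and, for n ≥ 2, matrices without two rows
-- of length ≥ 2 (IndexError inside mult); for n = 1 any x is accepted (A returns x).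
def Pre_f (x : List (List Int)) (n : Int) : Prop :=
  1 ≤ n ∧ (n = 1 ∨ (2 ≤ x.length ∧ 2 ≤ (x.getD 0 []).length ∧ 2 ≤ (x.getD 1 []).length))
instance (x : List (List Int)) (n : Int) : Decidable (Pre_f x n) := by unfold Pre_f; infer_instance

def pvWitness_f : List (List Int) × Int := ([[1, 1], [1, 0]], 5)

def Spec_f (x : List (List Int)) (n : Int) (out : List (List Int)) : Prop := out = f_alt x n
instance (x : List (List Int)) (n : Int) (out : List (List Int)) : Decidable (Spec_f x n out) := by unfold Spec_f; infer_instance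

-- ===== CLAIM (what is proved, stated in full; the proofs are below) =====
def Claim_equal_f : Prop := ∀ (x : List (List Int)) (n : Int), Dom_f x n → Pre_f x n → Spec_f x n (f x n)

-- ===== LEMMAS AND PROOFS =====
lemma bits_foldl (x : List (List Int)) (n : Nat) :
    (pvBits n).foldl
      (fun result c =>
        let result := multAB result result
        if c = 1 then multAB result x else result)
      x = fARec x n := by
  induction n using Nat.strong_induction_on with
  | _ n ih =>
    by_cases h : n ≤ 1
    · rw [pvBits, fARec]; simp [h]
    · rw [pvBits, fARec]
      simp only [h, dite_false, List.foldl_append]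
      rw [ih (n / 2) (by omega)]
      by_cases h2 : n % 2 = 0
      · simp [h2]
      · have : n % 2 = 1 := by omega
        simp [this]

-- ===== VERDICT (by name: the statement is the Claim_ definition above) =====
theorem f_spec : Claim_equal_f := by
  intro x n _ hpre
  have h1 : 1 ≤ n := hpre.1
  unfold Spec_f f f_alt
  rw [pvBin3, if_neg (by omega : ¬ n < 0)]
  exact (bits_foldl x n.toNat).symm
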